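-- pv_equiv track=rewrite | github.com/asmanasir/MedScribe-AI | src/medscribe/services/post_processing.py | remove_hallucinations
-- ===== SOURCE A (Python) =====
-- HALLUCINATION_MARKERS = [
--     "as an ai",
--     "i cannot",
--     "i don't have",
--     "i'm not sure",
--     "sorry",
--     "please note",
--     "disclaimer",
--     "this is not medical advice",
-- ]
--
-- def remove_hallucinations(text: str) -> str:
--     """Remove obvious hallucination markers from LLM output."""
--     text_lower = text.lower()
--     for marker in HALLUCINATION_MARKERS:
--         if marker in text_lower:
--             # Remove the sentence containing the marker
--             sentences = text.split('. ')
--             sentences = [s for s in sentences if marker not in s.lower()]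
--             text = '. '.join(sentences)
--     return text
-- ===== SOURCE B (Python) =====
-- HALLUCINATION_MARKERS = [
--     "as an ai",
--     "i cannot",
--     "i don't have",
--     "i'm not sure",
--     "sorry",
--     "please note",
--     "disclaimer",
--     "this is not medical advice",
-- ]
--
-- def remove_hallucinations(text: str) -> str:
--     """Remove obvious hallucination markers from LLM output.
--
--     Single left-to-right scan: sentences are cut at each '. ' as they are met,
--     each finished sentence is appended to the output immediately unless its
--     lowercase form contains a marker; no split/join of the whole text."""
--     def emit(acc, sent):
--         low = sent.lower()
--         if any(m in low for m in HALLUCINATION_MARKERS):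
--             return acc
--         return sent if acc is None else acc + '. ' + sent
--     acc = None
--     cur = []
--     i = 0
--     n = len(text)
--     while i < n:
--         if text[i] == '.' and i + 1 < n and text[i + 1] == ' ':
--             acc = emit(acc, ''.join(cur))
--             cur = []
--             i += 2
--         else:
--             cur.append(text[i])
--             i += 1
--     acc = emit(acc, ''.join(cur))
--     return '' if acc is None else acc
-- ===== Notes on version B (the rewrite author's own statement) =====
-- stated objective: alternative
-- what changed: A re-splits, re-filters and re-joins the whole text once per marker found in the text; B makes a single character-level scan that cuts sentences at each '. ' and appends each marker-free sentence to the output as it is completed, never splitting or joining the whole text.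
import Mathlib
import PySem

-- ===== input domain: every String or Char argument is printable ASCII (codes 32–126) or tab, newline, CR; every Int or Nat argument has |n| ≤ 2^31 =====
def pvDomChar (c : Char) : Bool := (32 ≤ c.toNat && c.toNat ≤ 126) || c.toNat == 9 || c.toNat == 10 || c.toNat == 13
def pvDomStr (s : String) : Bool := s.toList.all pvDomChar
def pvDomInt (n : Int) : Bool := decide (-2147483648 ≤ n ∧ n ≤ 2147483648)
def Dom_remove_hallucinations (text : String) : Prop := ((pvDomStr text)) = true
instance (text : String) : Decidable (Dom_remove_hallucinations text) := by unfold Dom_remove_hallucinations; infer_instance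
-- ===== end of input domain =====

-- B replaces A's per-marker re-split/re-filter/re-join loop by one streaming character scan that
-- cuts sentences at '. ' and appends each marker-free sentence to the output as it is completed
-- (objective: alternative — a genuinely different, single-pass algorithm of similar cost).

-- shared literals: the sentence separator '. ' and HALLUCINATION_MARKERS, as char lists
def sepL : List Char := ['.', ' ']

def hallucinationMarkers : List (List Char) :=
  ["as an ai".toList, "i cannot".toList, "i don't have".toList, "i'm not sure".toList,
   "sorry".toList, "please note".toList, "disclaimer".toList, "this is not medical advice".toList]

-- ===== PORT A =====
-- literal transliteration of A: text_lower computed once; for each marker present in text_lower,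
-- split current text on '. ', drop sentences whose lower contains the marker, re-join.
def remove_hallucinations (text : String) : String :=
  let text_lower := PySem.Chars.lower text.toList
  String.ofList <|
    hallucinationMarkers.foldl
      (fun t marker =>
        if PySem.Chars.isIn marker text_lower then
          PySem.Chars.join sepL
            ((PySem.Chars.splitOn t sepL).filter
              (fun s => !PySem.Chars.isIn marker (PySem.Chars.lower s)))
        else t)
      text.toList

-- ===== PORT B =====
-- transliteration of B's `emit`: drop the finished sentence if any marker occurs in its
-- lowercase form, otherwise append it to the output accumulated so far ('. '-separated).
def emitB (acc : Option (List Char)) (sent : List Char) : Option (List Char) :=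
  if hallucinationMarkers.any (fun m => PySem.Chars.isIn m (PySem.Chars.lower sent)) then acc
  else some (match acc with | none => sent | some r => r ++ sepL ++ sent)

-- transliteration of B's while-loop as its tail recursion: `cur` is the sentence being read
-- (reversed, Python appends at the end), `acc` the output so far; the "text[i]=='.' and
-- text[i+1]==' '" test is the sepL-prefix test on the unread remainder.
def scanB (l cur : List Char) (acc : Option (List Char)) : List Char :=
  match l with
  | [] => (emitB acc cur.reverse).getD []
  | c :: rest =>
    if sepL.isPrefixOf (c :: rest) then scanB (rest.drop 1) [] (emitB acc cur.reverse)
    else scanB rest (c :: cur) acc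
termination_by l.length
decreasing_by all_goals (simp; try omega)

def remove_hallucinations_alt (text : String) : String :=
  String.ofList (scanB text.toList [] none)

-- ===== PRECONDITION & SPEC =====
def Spec_remove_hallucinations (text : String) (out : String) : Prop := out = remove_hallucinations_alt text
instance (text : String) (out : String) : Decidable (Spec_remove_hallucinations text out) := by unfold Spec_remove_hallucinations; infer_instance

-- ===== CLAIM (what is proved, stated in full; the proofs are below) =====
def Claim_equal_remove_hallucinations : Prop := ∀ (text : String), Dom_remove_hallucinations text → Spec_remove_hallucinations text (remove_hallucinations text)

-- ===== LEMMAS AND PROOFS =====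

-- proof-side reference splitter: Python's split('. ') as plain structural recursion
def sp : List Char → List (List Char)
  | [] => [[]]
  | c :: rest =>
    if sepL.isPrefixOf (c :: rest) then [] :: sp (rest.drop 1)
    else (c :: (sp rest).headD []) :: (sp rest).tail
termination_by l => l.length
decreasing_by all_goals (simp; try omega)

theorem sp_ne_nil (l : List Char) : sp l ≠ [] := by
  cases l with
  | nil => simp [sp]
  | cons c rest => rw [sp]; split <;> simp

theorem sp_cons_reconstruct (l : List Char) : (sp l).headD [] :: (sp l).tail = sp l := by
  rcases h : sp l with _ | ⟨q, qs⟩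
  · exact absurd h (sp_ne_nil l)
  · simp

theorem sp_headD_prefix (l : List Char) : (sp l).headD [] <+: l := by
  induction l using sp.induct with
  | case1 => simp [sp]
  | case2 c rest h ih => rw [sp, if_pos h]; simp
  | case3 c rest h ih =>
    rw [sp, if_neg h]
    simp only [List.headD_cons]
    exact List.cons_prefix_cons.mpr ⟨rfl, ih⟩

theorem sp_mem_infix (l : List Char) : ∀ p ∈ sp l, p <:+: l := by
  induction l using sp.induct with
  | case1 => intro p hp; simp [sp] at hp; simp [hp]
  | case2 c rest h ih =>
    intro p hp
    rw [sp, if_pos h] at hp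
    rcases List.mem_cons.mp hp with rfl | hp
    · exact List.nil_infix
    · exact (ih p hp).trans ((List.drop_suffix 1 rest).isInfix.trans (List.suffix_cons c rest).isInfix)
  | case3 c rest h ih =>
    intro p hp
    rw [sp, if_neg h] at hp
    rcases List.mem_cons.mp hp with rfl | hp
    · exact (List.cons_prefix_cons.mpr ⟨rfl, sp_headD_prefix rest⟩).isInfix
    · exact ((ih p (List.mem_of_mem_tail hp)).trans (List.suffix_cons c rest).isInfix)

theorem sp_not_infix (l : List Char) : ∀ p ∈ sp l, ¬ sepL <:+: p := by
  induction l using sp.induct with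
  | case1 =>
    intro p hp hinf
    simp [sp] at hp
    subst hp
    have := hinf.length_le
    simp [sepL] at this
  | case2 c rest h ih =>
    intro p hp
    rw [sp, if_pos h] at hp
    rcases List.mem_cons.mp hp with rfl | hp
    · intro hinf
      have := hinf.length_le
      simp [sepL] at this
    · exact ih p hp
  | case3 c rest h ih =>
    intro p hp
    rw [sp, if_neg h] at hp
    rcases List.mem_cons.mp hp with rfl | hp
    · intro hinf
      rcases List.infix_cons_iff.mp hinf with hpre | hinf'
      · have : sepL <+: c :: rest :=
          hpre.trans (List.cons_prefix_cons.mpr ⟨rfl, sp_headD_prefix rest⟩)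
        exact h (List.isPrefixOf_iff_prefix.mpr this)
      · have hmem : (sp rest).headD [] ∈ sp rest := by
          rcases hq : sp rest with _ | ⟨q, qs⟩
          · exact absurd hq (sp_ne_nil rest)
          · simp
        exact ih _ hmem hinf'
    · exact ih p (List.mem_of_mem_tail hp)

theorem sp_single (p : List Char) (hp : ¬ sepL <:+: p) : sp p = [p] := by
  induction p with
  | nil => simp [sp]
  | cons c rest ih =>
    rw [sp, if_neg]
    · rw [ih (fun h => hp (h.trans (List.suffix_cons c rest).isInfix))]
      simp
    · intro h
      exact hp (List.isPrefixOf_iff_prefix.mp h).isInfix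

theorem sp_append (p t : List Char) (hp : ¬ sepL <:+: p) :
    sp (p ++ sepL ++ t) = p :: sp t := by
  induction p with
  | nil =>
    show sp ('.' :: ' ' :: t) = [] :: sp t
    rw [sp, if_pos (by simp [sepL, List.isPrefixOf])]
    simp
  | cons c rest ih =>
    have hrest : ¬ sepL <:+: rest := fun h => hp (h.trans (List.suffix_cons c rest).isInfix)
    show sp (c :: (rest ++ sepL ++ t)) = (c :: rest) :: sp t
    rw [sp, if_neg, ih hrest]
    · simp
    · intro hpre
      rw [List.isPrefixOf_iff_prefix] at hpre
      rcases hpre with ⟨u, hu⟩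
      cases rest with
      | nil => simp [sepL] at hu
      | cons d rest' =>
        simp only [sepL, List.cons_append, List.cons.injEq, List.nil_append] at hu
        apply hp
        exact ⟨[], rest', by simp [sepL, ← hu.1, ← hu.2.1]⟩

theorem sp_join (ps : List (List Char)) (hne : ps ≠ [])
    (h : ∀ p ∈ ps, ¬ sepL <:+: p) : sp (PySem.Chars.join sepL ps) = ps := by
  induction ps with
  | nil => exact absurd rfl hne
  | cons p ps ih =>
    cases ps with
    | nil =>
      rw [PySem.Chars.join_singleton]
      exact sp_single p (h p (by simp))
    | cons p2 ps' =>
      rw [PySem.Chars.join_cons_cons,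
          sp_append p _ (h p (by simp)), ih (by simp)]
      intro q hq
      exact h q (List.mem_cons_of_mem _ hq)

theorem join_sp (l : List Char) : PySem.Chars.join sepL (sp l) = l := by
  induction l using sp.induct with
  | case1 => simp [sp, PySem.Chars.join_singleton]
  | case2 c rest h ih =>
    rw [sp, if_pos h]
    rcases hq : sp (rest.drop 1) with _ | ⟨q, qs⟩
    · exact absurd hq (sp_ne_nil _)
    · rw [hq] at ih
      rw [PySem.Chars.join_cons_cons, ih]
      have hpre := List.isPrefixOf_iff_prefix.mp h
      rcases hpre with ⟨u, hu⟩
      cases rest with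
      | nil => simp [sepL] at hu
      | cons d rest' =>
        simp only [sepL, List.cons_append, List.cons.injEq, List.nil_append] at hu
        simp [sepL, ← hu.1, ← hu.2.1, ← hu.2.2]
  | case3 c rest h ih =>
    rw [sp, if_neg h]
    rcases hq : sp rest with _ | ⟨q, qs⟩
    · exact absurd hq (sp_ne_nil _)
    · rw [hq] at ih
      cases qs with
      | nil =>
        simp only [List.headD_cons, List.tail_cons]
        rw [PySem.Chars.join_singleton] at ih ⊢
        simp [ih]
      | cons q2 qs' =>
        rw [PySem.Chars.join_cons_cons] at ih
        simp only [List.headD_cons, List.tail_cons]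
        rw [PySem.Chars.join_cons_cons, List.cons_append, List.cons_append, ih]

-- PySem's splitOn agrees with the reference splitter sp for the separator '. '
theorem splitOn_go_eq (fuel : Nat) : ∀ (l cur : List Char) (acc : List (List Char)),
    l.length < fuel →
    PySem.Chars.splitOn.go sepL fuel l cur acc =
      acc.reverse ++ ((cur.reverse ++ (sp l).headD []) :: (sp l).tail) := by
  induction fuel with
  | zero => intro l cur acc h; omega
  | succ fuel ih =>
    intro l cur acc h
    cases l with
    | nil =>
      rw [PySem.Chars.splitOn.go]
      simp [sp]
      omega
    | cons c rest =>
      rw [PySem.Chars.splitOn.go]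
      by_cases hpre : sepL.isPrefixOf (c :: rest)
      · rw [if_pos hpre, ih _ _ _ (by simp [sepL] at h ⊢; omega)]
        rw [sp, if_pos hpre]
        rcases hq : sp ((c :: rest).drop sepL.length) with _ | ⟨q, qs⟩
        · exact absurd hq (sp_ne_nil _)
        · have : (c :: rest).drop sepL.length = rest.drop 1 := by simp [sepL]
          rw [this, List.drop_one] at hq
          simp [hq]
      · rw [if_neg hpre, ih _ _ _ (by simp at h ⊢; omega)]
        rw [sp, if_neg hpre]
        simp

theorem splitOn_eq_sp (l : List Char) : PySem.Chars.splitOn l sepL = sp l := by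
  unfold PySem.Chars.splitOn
  rw [splitOn_go_eq (l.length + 1) l [] [] (by omega)]
  simpa using (sp_cons_reconstruct l)

theorem lower_infix {s t : List Char} (h : s <:+: t) :
    PySem.Chars.lower s <:+: PySem.Chars.lower t := by
  unfold PySem.Chars.lower
  exact h.map _

-- main invariant for A: A's fold over any marker list, started from the join of a filtered
-- sentence list of t0, filters by the conjunction of the markers' absence
theorem foldA (t0 : List Char) (ms : List (List Char)) :
    ∀ (q : List Char → Bool), (∀ m ∈ ms, m ≠ []) →
    ms.foldl
      (fun t marker =>
        if PySem.Chars.isIn marker (PySem.Chars.lower t0) then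
          PySem.Chars.join sepL
            ((PySem.Chars.splitOn t sepL).filter
              (fun s => !PySem.Chars.isIn marker (PySem.Chars.lower s)))
        else t)
      (PySem.Chars.join sepL ((sp t0).filter q)) =
    PySem.Chars.join sepL
      ((sp t0).filter (fun s => q s && ms.all (fun m => !PySem.Chars.isIn m (PySem.Chars.lower s)))) := by
  induction ms with
  | nil => simp
  | cons m ms ih =>
    intro q hm
    rw [List.foldl_cons]
    have hms : ∀ m' ∈ ms, m' ≠ [] := fun m' h => hm m' (List.mem_cons_of_mem _ h)
    have key : (if PySem.Chars.isIn m (PySem.Chars.lower t0) then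
          PySem.Chars.join sepL
            ((PySem.Chars.splitOn (PySem.Chars.join sepL ((sp t0).filter q)) sepL).filter
              (fun s => !PySem.Chars.isIn m (PySem.Chars.lower s)))
        else PySem.Chars.join sepL ((sp t0).filter q)) =
        PySem.Chars.join sepL ((sp t0).filter (fun s => q s && !PySem.Chars.isIn m (PySem.Chars.lower s))) := by
      by_cases hin : PySem.Chars.isIn m (PySem.Chars.lower t0)
      · rw [if_pos hin]
        rcases hf : (sp t0).filter q with _ | ⟨p, ps⟩
        · -- everything already filtered away: current text is empty
          have h2 : (sp t0).filter (fun s => q s && !PySem.Chars.isIn m (PySem.Chars.lower s)) = [] := by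
            rw [List.filter_eq_nil_iff] at hf ⊢
            intro a ha hpa
            exact hf a ha (by simp only [Bool.and_eq_true] at hpa; exact hpa.1)
          rw [h2, PySem.Chars.join_nil, splitOn_eq_sp]
          have hmnil : m ≠ [] := hm m (by simp)
          have : ¬ PySem.Chars.isIn m (PySem.Chars.lower []) = true := by
            rw [PySem.Chars.isIn_iff_infix]
            intro hinf
            exact hmnil (List.eq_nil_of_infix_nil (by simpa [PySem.Chars.lower] using hinf))
          simp [sp, this, PySem.Chars.join_singleton]
        · rw [splitOn_eq_sp, sp_join (p :: ps) (by simp)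
              (fun x hx => sp_not_infix t0 x (List.mem_of_mem_filter (hf.symm ▸ hx)))]
          rw [← hf, List.filter_filter]
          congr 1
          apply List.filter_congr
          intro s _
          simp [Bool.and_comm]
      · rw [if_neg hin]
        congr 1
        apply List.filter_congr
        intro s hs
        have : ¬ PySem.Chars.isIn m (PySem.Chars.lower s) = true := by
          rw [PySem.Chars.isIn_iff_infix]
          intro hinf
          exact hin ((PySem.Chars.isIn_iff_infix _ _).mpr
            (hinf.trans (lower_infix (sp_mem_infix t0 s hs))))
        simp [this]
    rw [key, ih _ hms]
    congr 1
    apply List.filter_congr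
    intro s _
    simp [Bool.and_assoc]

-- B-side: the filter predicate emitB keeps, as a function
def keepB (s : List Char) : Bool :=
  !(hallucinationMarkers.any (fun m => PySem.Chars.isIn m (PySem.Chars.lower s)))

theorem join_head_append (a b : List Char) (rest : List (List Char)) :
    PySem.Chars.join sepL ((a ++ sepL ++ b) :: rest) = a ++ sepL ++ PySem.Chars.join sepL (b :: rest) := by
  cases rest with
  | nil => rw [PySem.Chars.join_singleton, PySem.Chars.join_singleton]
  | cons r rs => rw [PySem.Chars.join_cons_cons, PySem.Chars.join_cons_cons]; simp

theorem foldl_emitB_some (ps : List (List Char)) : ∀ (r : List Char),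
    List.foldl emitB (some r) ps = some (PySem.Chars.join sepL (r :: ps.filter keepB)) := by
  induction ps with
  | nil => intro r; rw [List.filter_nil, PySem.Chars.join_singleton]; rfl
  | cons p ps ih =>
    intro r
    rw [List.foldl_cons]
    by_cases hk : keepB p = true
    · have hany : hallucinationMarkers.any (fun m => PySem.Chars.isIn m (PySem.Chars.lower p)) = false := by
        unfold keepB at hk; simpa using hk
      rw [show emitB (some r) p = some (r ++ sepL ++ p) by simp [emitB, hany]]
      rw [ih, List.filter_cons_of_pos hk, join_head_append]
      cases ps.filter keepB with
      | nil => simp only [PySem.Chars.join_cons_cons, PySem.Chars.join_singleton]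
      | cons q qs => simp only [PySem.Chars.join_cons_cons, List.append_assoc]
    · have hany : hallucinationMarkers.any (fun m => PySem.Chars.isIn m (PySem.Chars.lower p)) = true := by
        unfold keepB at hk; simpa using hk
      rw [show emitB (some r) p = some r by simp [emitB, hany]]
      rw [ih, List.filter_cons_of_neg (by simpa using hk)]

theorem foldl_emitB_none (ps : List (List Char)) :
    (List.foldl emitB none ps).getD [] = PySem.Chars.join sepL (ps.filter keepB) := by
  induction ps with
  | nil => simp [PySem.Chars.join_nil]
  | cons p ps ih =>
    rw [List.foldl_cons]
    by_cases hk : keepB p = true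
    · have hany : hallucinationMarkers.any (fun m => PySem.Chars.isIn m (PySem.Chars.lower p)) = false := by
        unfold keepB at hk; simpa using hk
      rw [show emitB none p = some p by simp [emitB, hany]]
      rw [foldl_emitB_some, List.filter_cons_of_pos hk]
      simp
    · have hany : hallucinationMarkers.any (fun m => PySem.Chars.isIn m (PySem.Chars.lower p)) = true := by
        unfold keepB at hk; simpa using hk
      rw [show emitB none p = none by simp [emitB, hany]]
      rw [ih, List.filter_cons_of_neg (by simpa using hk)]

-- the scan invariant: the streaming scan equals folding emitB over the remaining sentences,
-- the first of which is the partial sentence cur (reversed) glued to the head chunk of l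
theorem scanB_eq (l : List Char) : ∀ (cur : List Char) (acc : Option (List Char)),
    scanB l cur acc =
      (List.foldl emitB acc ((cur.reverse ++ (sp l).headD []) :: (sp l).tail)).getD [] := by
  induction l using sp.induct with
  | case1 =>
    intro cur acc
    rw [scanB, sp]
    simp [List.foldl_cons]
  | case2 c rest h ih =>
    intro cur acc
    rw [scanB, if_pos h, sp, if_pos h, ih]
    simp only [List.headD_cons, List.tail_cons, List.reverse_nil, List.nil_append, List.append_nil,
      List.foldl_cons]
    conv_rhs => rw [← sp_cons_reconstruct (List.drop 1 rest)]
    rw [List.foldl_cons]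
  | case3 c rest h ih =>
    intro cur acc
    rw [scanB, if_neg h, sp, if_neg h, ih]
    simp

-- ===== VERDICT (by name: the statement is the Claim_ definition above) =====
theorem remove_hallucinations_spec : Claim_equal_remove_hallucinations := by
  intro text _
  unfold Spec_remove_hallucinations remove_hallucinations remove_hallucinations_alt
  have hA := foldA text.toList hallucinationMarkers (fun _ => true) (by decide)
  rw [List.filter_true, join_sp] at hA
  simp only [splitOn_eq_sp, Bool.true_and] at hA
  simp only [splitOn_eq_sp, hA]
  rw [scanB_eq]
  simp only [List.reverse_nil, List.nil_append]
  rw [sp_cons_reconstruct, foldl_emitB_none]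
  congr 2
  apply List.filter_congr
  intro s _
  unfold keepB
  simp [List.all_eq_not_any_not]
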